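-- pv_equiv track=rewrite | github.com/PelzKo/mario-kart-tournament | src/tournament/scheduling.py | compute_game_sizes
-- ===== SOURCE A (Python) =====
-- from typing import List
--
-- def compute_game_sizes(num_players: int, games_per_player: int) -> List[int]:
--     """
--     Determine how many players should be in each game.
--
--     Total slots = num_players * games_per_player.
--     Each game has 3 or 4 players.
--     Minimize variance: use as many 3-player games as possible before going to 4.
--
--     Returns a list of game sizes (each is 3 or 4).
--     """
--     total_slots = num_players * games_per_player
--
--     # total_slots = 3*a + 4*b where a+b = num_games
--     # We want to minimise variance, so prefer equal sizes.
--     # Try all combos: for each number of 4-player games b, check if a = (total_slots - 4b) / 3 is integer.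
--     best = None
--     for b in range(0, total_slots // 4 + 1):
--         remainder = total_slots - 4 * b
--         if remainder >= 0 and remainder % 3 == 0:
--             a = remainder // 3
--             sizes = [4] * b + [3] * a
--             # Score: prefer smaller variance (more equal sizes)
--             if best is None:
--                 best = sizes
--             else:
--                 # Pick sizes with smaller max-min range
--                 if (max(sizes) - min(sizes)) < (max(best) - min(best)):
--                     best = sizes
--                 elif (max(sizes) - min(sizes)) == (max(best) - min(best)):
--                     # Same variance: prefer more games (smaller sizes)
--                     if len(sizes) > len(best):
--                         best = sizes
--     if best is None:
--         raise ValueError(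
--             f"Cannot schedule {num_players} players with {games_per_player} games each "
--             f"into groups of 3-4."
--         )
--     return best
-- ===== SOURCE B (Python) =====
-- from typing import List
--
-- def compute_game_sizes(num_players: int, games_per_player: int) -> List[int]:
--     """Closed-form: A's search always picks all-3s when 3 | total, else all-4s
--     when 4 | total, else (total % 3) four-player games plus threes."""
--     total = num_players * games_per_player
--     if total < 0 or total in (1, 2, 5):
--         raise ValueError(
--             f"Cannot schedule {num_players} players with {games_per_player} games each "
--             f"into groups of 3-4."
--         )
--     if total % 3 == 0:
--         return [3] * (total // 3)
--     if total % 4 == 0: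
--         return [4] * (total // 4)
--     b = total % 3
--     return [4] * b + [3] * ((total - 4 * b) // 3)
-- ===== Notes on version B (the rewrite author's own statement) =====
-- stated objective: faster
-- what changed: Replaced A's exhaustive scan over all counts of 4-player games (building and comparing a size list per candidate) with an O(1) closed form: all 3s if 3 | total, else all 4s if 4 | total, else (total % 3) fours plus threes; building the output is O(total/3).
import Mathlib
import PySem

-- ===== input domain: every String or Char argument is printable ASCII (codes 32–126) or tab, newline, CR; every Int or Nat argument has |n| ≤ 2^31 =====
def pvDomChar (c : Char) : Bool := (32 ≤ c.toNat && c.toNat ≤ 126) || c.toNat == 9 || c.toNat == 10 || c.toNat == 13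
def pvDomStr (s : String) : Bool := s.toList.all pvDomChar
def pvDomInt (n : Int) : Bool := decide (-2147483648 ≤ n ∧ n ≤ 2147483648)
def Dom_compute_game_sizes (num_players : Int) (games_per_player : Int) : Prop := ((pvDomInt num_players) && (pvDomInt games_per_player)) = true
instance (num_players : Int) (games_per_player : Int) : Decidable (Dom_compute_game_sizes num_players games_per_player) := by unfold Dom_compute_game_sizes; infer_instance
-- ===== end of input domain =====

-- B replaces A's exhaustive scan over candidate counts of 4-player games with an O(1)
-- closed form (all 3s / all 4s / (total % 3) fours plus threes); same return value on Pre_.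

-- ===== PORT A =====
-- loop body of A's 'for b in range(0, total_slots // 4 + 1)'
def cgsStep (total_slots : Int) (best : Option (List Int)) (b : Int) : Option (List Int) :=
  let remainder := total_slots - 4 * b
  if 0 ≤ remainder ∧ PySem.Int.mod remainder 3 = 0 then
    let a := PySem.Int.floordiv remainder 3
    let sizes := PySem.List.pyRepeat [(4 : Int)] b ++ PySem.List.pyRepeat [(3 : Int)] a
    match best with
    | none => some sizes
    | some bst =>
        let rs := (PySem.List.max? sizes (fun x => x)).getD 0 - (PySem.List.min? sizes (fun x => x)).getD 0
        let rb := (PySem.List.max? bst (fun x => x)).getD 0 - (PySem.List.min? bst (fun x => x)).getD 0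
        if rs < rb then some sizes
        else if rs = rb then (if bst.length < sizes.length then some sizes else some bst)
        else some bst
  else best

def compute_game_sizes (num_players : Int) (games_per_player : Int) : List Int :=
  let total_slots := num_players * games_per_player
  let best := (PySem.List.pyRange 0 (PySem.Int.floordiv total_slots 4 + 1) 1).foldl (cgsStep total_slots) none
  best.getD []   -- 'best is None' means Python raises ValueError: excluded by Pre_

-- ===== PORT B =====
def compute_game_sizes_alt (num_players : Int) (games_per_player : Int) : List Int :=
  let total := num_players * games_per_player
  if total < 0 ∨ total = 1 ∨ total = 2 ∨ total = 5 then []   -- B raises ValueError here: excluded by Pre_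
  else if PySem.Int.mod total 3 = 0 then PySem.List.pyRepeat [(3 : Int)] (PySem.Int.floordiv total 3)
  else if PySem.Int.mod total 4 = 0 then PySem.List.pyRepeat [(4 : Int)] (PySem.Int.floordiv total 4)
  else
    let b := PySem.Int.mod total 3
    PySem.List.pyRepeat [(4 : Int)] b ++ PySem.List.pyRepeat [(3 : Int)] (PySem.Int.floordiv (total - 4 * b) 3)

-- ===== PRECONDITION & SPEC =====
-- Pre_ admits exactly the inputs on which Python A returns: it raises ValueError when
-- total slots are negative or equal to 1, 2 or 5 (no partition into 3s and 4s exists).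
def Pre_compute_game_sizes (num_players : Int) (games_per_player : Int) : Prop :=
  0 ≤ num_players * games_per_player ∧ num_players * games_per_player ≠ 1 ∧
  num_players * games_per_player ≠ 2 ∧ num_players * games_per_player ≠ 5

instance (num_players : Int) (games_per_player : Int) : Decidable (Pre_compute_game_sizes num_players games_per_player) := by
  unfold Pre_compute_game_sizes; infer_instance

def pvWitness_compute_game_sizes : Int × Int := (7, 2)

def Spec_compute_game_sizes (num_players : Int) (games_per_player : Int) (out : List Int) : Prop := out = compute_game_sizes_alt num_players games_per_player
instance (num_players : Int) (games_per_player : Int) (out : List Int) : Decidable (Spec_compute_game_sizes num_players games_per_player out) := by unfold Spec_compute_game_sizes; infer_instance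

-- ===== CLAIM (what is proved, stated in full; the proofs are below) =====
def Claim_equal_compute_game_sizes : Prop := ∀ (num_players : Int) (games_per_player : Int), Dom_compute_game_sizes num_players games_per_player → Pre_compute_game_sizes num_players games_per_player → Spec_compute_game_sizes num_players games_per_player (compute_game_sizes num_players games_per_player)

-- ===== LEMMAS AND PROOFS =====

-- the best list A holds after having processed b = 0 .. k-1 (t = total slots)
def expBest (t k : Int) : Option (List Int) :=
  if k ≤ t % 3 then none
  else if t % 3 = 0 then some (List.replicate (t / 3).toNat 3)
  else if t % 4 = 0 ∧ t / 4 < k then some (List.replicate (t / 4).toNat 4)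
  else some (List.replicate (t % 3).toNat 4 ++ List.replicate ((t - 4 * (t % 3)) / 3).toNat 3)

lemma mem_rep_rep {p q : Nat} {x : Int} (hx : x ∈ List.replicate p (4:Int) ++ List.replicate q 3) :
    x = 4 ∨ x = 3 := by
  rcases List.mem_append.1 hx with h | h
  · exact Or.inl (List.eq_of_mem_replicate h)
  · exact Or.inr (List.eq_of_mem_replicate h)

lemma max_rep_rep (p q : Nat) (hpq : 0 < p ∨ 0 < q) :
    (PySem.List.max? (List.replicate p (4:Int) ++ List.replicate q 3) (fun x => x)).getD 0
      = (if 0 < p then 4 else 3) := by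
  set xs := List.replicate p (4:Int) ++ List.replicate q 3 with hxs
  have hne : xs ≠ [] := by
    simp only [hxs]
    rcases hpq with h | h <;> rcases p with _ | p <;> rcases q with _ | q <;> simp_all [List.replicate_succ]
  obtain ⟨m, hm⟩ : ∃ m, PySem.List.max? xs (fun x => x) = some m := by
    cases h : PySem.List.max? xs (fun x => x) with
    | none => exact absurd ((PySem.List.max?_eq_none_iff xs _).1 h) hne
    | some m => exact ⟨m, rfl⟩
  have hmem := PySem.List.max?_mem hm
  have hmax := PySem.List.max?_isMax hm
  rw [hm]
  rcases mem_rep_rep hmem with h4 | h3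
  · -- m = 4: p must be positive (a 4 is in the list)
    have hp : 0 < p := by
      by_contra hp
      have : p = 0 := by omega
      subst this
      simp only [hxs, List.replicate_zero, List.nil_append] at hmem
      have := List.eq_of_mem_replicate hmem; omega
    simp [hp, h4]
  · -- m = 3: no 4 may be in the list, so p = 0
    have hp : p = 0 := by
      by_contra hp
      have h4m : (4:Int) ∈ xs := by
        rw [hxs]
        exact List.mem_append_left _ (List.mem_replicate.2 ⟨by omega, rfl⟩)
      have := hmax 4 h4m; omega
    simp [hp, h3]

lemma min_rep_rep (p q : Nat) (hpq : 0 < p ∨ 0 < q) :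
    (PySem.List.min? (List.replicate p (4:Int) ++ List.replicate q 3) (fun x => x)).getD 0
      = (if 0 < q then 3 else 4) := by
  set xs := List.replicate p (4:Int) ++ List.replicate q 3 with hxs
  have hne : xs ≠ [] := by
    simp only [hxs]
    rcases hpq with h | h <;> rcases p with _ | p <;> rcases q with _ | q <;> simp_all [List.replicate_succ]
  obtain ⟨m, hm⟩ : ∃ m, PySem.List.min? xs (fun x => x) = some m := by
    cases h : PySem.List.min? xs (fun x => x) with
    | none => exact absurd ((PySem.List.min?_eq_none_iff xs _).1 h) hne
    | some m => exact ⟨m, rfl⟩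
  have hmem := PySem.List.min?_mem hm
  have hmin := PySem.List.min?_isMin hm
  rw [hm]
  rcases mem_rep_rep hmem with h4 | h3
  · have hq : q = 0 := by
      by_contra hq
      have h3m : (3:Int) ∈ xs := by
        rw [hxs]
        exact List.mem_append_right _ (List.mem_replicate.2 ⟨by omega, rfl⟩)
      have := hmin 3 h3m; omega
    simp [hq, h4]
  · have hq : 0 < q := by
      by_contra hq
      have : q = 0 := by omega
      subst this
      simp only [hxs, List.replicate_zero, List.append_nil] at hmem
      have := List.eq_of_mem_replicate hmem; omega
    simp [hq, h3]

-- range (max - min) of the candidate list [4]*p ++ [3]*q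
lemma rng_rep_rep (p q : Nat) (hpq : 0 < p ∨ 0 < q) :
    (PySem.List.max? (List.replicate p (4:Int) ++ List.replicate q 3) (fun x => x)).getD 0
      - (PySem.List.min? (List.replicate p (4:Int) ++ List.replicate q 3) (fun x => x)).getD 0
      = (if 0 < p ∧ 0 < q then 1 else 0) := by
  rw [max_rep_rep p q hpq, min_rep_rep p q hpq]
  rcases Nat.eq_zero_or_pos p with hp | hp <;> rcases Nat.eq_zero_or_pos q with hq | hq <;>
    simp_all

-- one loop step preserves the invariant
lemma step_inv (t k : Int) (ht0 : 0 ≤ t) (hk0 : 0 ≤ k) (hk4 : k ≤ t / 4) :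
    cgsStep t (expBest t k) k = expBest t (k + 1) := by
  have hrem : 4 * k ≤ t := by omega
  have hmod3 : PySem.Int.mod (t - 4 * k) 3 = (t - 4 * k) % 3 := PySem.Int.mod_eq_emod_of_pos (by omega)
  have hdiv3 : PySem.Int.floordiv (t - 4 * k) 3 = (t - 4 * k) / 3 := PySem.Int.floordiv_eq_ediv_of_pos (by omega)
  by_cases hcand : (t - 4 * k) % 3 = 0
  · -- candidate at b = k
    have hkmod : k % 3 = t % 3 := by omega
    have hksz : (PySem.List.pyRepeat [(4:Int)] k ++ PySem.List.pyRepeat [(3:Int)] ((t - 4*k)/3))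
        = List.replicate k.toNat 4 ++ List.replicate ((t - 4*k)/3).toNat 3 := by
      rw [PySem.List.pyRepeat_singleton, PySem.List.pyRepeat_singleton]
    by_cases hfirst : k ≤ t % 3
    · -- best is still none; k is the first candidate, so k = t % 3
      have hkeq : k = t % 3 := by omega
      simp only [cgsStep, expBest, if_pos hfirst, hmod3, hdiv3]
      rw [if_pos (show 0 ≤ t - 4 * k ∧ (t - 4 * k) % 3 = 0 from ⟨by omega, hcand⟩)]
      simp only [hksz]
      rw [if_neg (show ¬ (k + 1 ≤ t % 3) by omega)]
      by_cases h30 : t % 3 = 0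
      · -- first candidate is b = 0: all 3s
        rw [if_pos h30]
        have : k = 0 := by omega
        subst this
        simp only [Int.toNat_zero, List.replicate_zero, List.nil_append]
        congr 2; omega
      · rw [if_neg h30]
        by_cases h4 : t % 4 = 0 ∧ t / 4 < k + 1
        · -- the first candidate is already the all-4s one: t = 4k
          rw [if_pos h4]
          have hteq : t = 4 * k := by omega
          rw [show (t - 4 * k) / 3 = 0 by omega]
          simp only [Int.toNat_zero, List.replicate_zero, List.append_nil]
          congr 2; omega
        · rw [if_neg h4]
          rw [hkeq]
    · -- best is some bst
      have hlast : ¬ (k + 1 ≤ t % 3) := by omega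
      by_cases h30 : t % 3 = 0
      · -- best = all 3s, range 0; it always survives
        have ht3 : 3 ≤ t := by omega
        have hkpos : 0 < k := by omega
        simp only [cgsStep, expBest, if_neg hfirst, if_neg hlast, if_pos h30, hmod3, hdiv3]
        rw [if_pos (show 0 ≤ t - 4 * k ∧ (t - 4 * k) % 3 = 0 from ⟨by omega, hcand⟩)]
        simp only [hksz]
        have hRb : (PySem.List.max? (List.replicate (t/3).toNat (3:Int)) fun x => x).getD 0 -
            (PySem.List.min? (List.replicate (t/3).toNat (3:Int)) fun x => x).getD 0 = (0:Int) := by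
          have h := rng_rep_rep 0 (t/3).toNat (Or.inr (by omega))
          simp only [List.replicate_zero, List.nil_append] at h
          rw [h, if_neg (show ¬ ((0:Nat) < 0 ∧ 0 < (t/3).toNat) by omega)]
        rw [hRb]
        by_cases ha : 0 < ((t - 4*k)/3).toNat
        · -- mixed candidate, range 1 > 0: keep best
          have hRs : (PySem.List.max? (List.replicate k.toNat (4:Int) ++ List.replicate ((t - 4*k)/3).toNat 3) fun x => x).getD 0 -
              (PySem.List.min? (List.replicate k.toNat (4:Int) ++ List.replicate ((t - 4*k)/3).toNat 3) fun x => x).getD 0 = (1:Int) := by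
            rw [rng_rep_rep _ _ (Or.inl (by omega)),
              if_pos (show 0 < k.toNat ∧ 0 < ((t - 4*k)/3).toNat from ⟨by omega, ha⟩)]
          rw [hRs, if_neg (show ¬ ((1:Int) < 0) by norm_num), if_neg (show ((1:Int) = 0) → False by norm_num)]
        · -- a = 0: t = 4k, tie at range 0; best has more games
          have hteq : t = 4 * k := by omega
          have hRs : (PySem.List.max? (List.replicate k.toNat (4:Int) ++ List.replicate ((t - 4*k)/3).toNat 3) fun x => x).getD 0 -
              (PySem.List.min? (List.replicate k.toNat (4:Int) ++ List.replicate ((t - 4*k)/3).toNat 3) fun x => x).getD 0 = (0:Int) := by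
            rw [rng_rep_rep _ _ (Or.inl (by omega)),
              if_neg (show ¬ (0 < k.toNat ∧ 0 < ((t - 4*k)/3).toNat) by omega)]
          rw [hRs, if_neg (show ¬ ((0:Int) < 0) by norm_num), if_pos rfl]
          simp only [List.length_append, List.length_replicate]
          rw [if_neg (show ¬ ((t/3).toNat < k.toNat + ((t - 4*k)/3).toNat) by omega)]
      · have h4 : ¬ (t % 4 = 0 ∧ t / 4 < k) := by rintro ⟨_, h⟩; omega
        -- best = the first (mixed) candidate at b = t % 3
        have hb0 : 0 < t % 3 := by omega
        have hkgt : t % 3 + 3 ≤ k := by omega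
        have hq0 : 0 < ((t - 4 * (t % 3)) / 3).toNat := by omega
        simp only [cgsStep, expBest, if_neg hfirst, if_neg hlast, if_neg h30, if_neg h4, hmod3, hdiv3]
        rw [if_pos (show 0 ≤ t - 4 * k ∧ (t - 4 * k) % 3 = 0 from ⟨by omega, hcand⟩)]
        simp only [hksz]
        have hRb : (PySem.List.max? (List.replicate (t % 3).toNat (4:Int) ++ List.replicate ((t - 4 * (t % 3))/3).toNat 3) fun x => x).getD 0 -
            (PySem.List.min? (List.replicate (t % 3).toNat (4:Int) ++ List.replicate ((t - 4 * (t % 3))/3).toNat 3) fun x => x).getD 0 = (1:Int) := by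
          rw [rng_rep_rep _ _ (Or.inl (by omega)),
            if_pos (show 0 < (t % 3).toNat ∧ 0 < ((t - 4 * (t % 3))/3).toNat from ⟨by omega, hq0⟩)]
        rw [hRb]
        by_cases ha : 0 < ((t - 4*k)/3).toNat
        · -- mixed vs mixed: tie at range 1, the earlier candidate has more games
          have hRs : (PySem.List.max? (List.replicate k.toNat (4:Int) ++ List.replicate ((t - 4*k)/3).toNat 3) fun x => x).getD 0 -
              (PySem.List.min? (List.replicate k.toNat (4:Int) ++ List.replicate ((t - 4*k)/3).toNat 3) fun x => x).getD 0 = (1:Int) := by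
            rw [rng_rep_rep _ _ (Or.inl (by omega)),
              if_pos (show 0 < k.toNat ∧ 0 < ((t - 4*k)/3).toNat from ⟨by omega, ha⟩)]
          rw [hRs, if_neg (show ¬ ((1:Int) < 1) by norm_num), if_pos rfl]
          simp only [List.length_append, List.length_replicate]
          rw [if_neg (show ¬ ((t % 3).toNat + ((t - 4 * (t % 3))/3).toNat < k.toNat + ((t - 4*k)/3).toNat) by omega),
            if_neg (show ¬ (t % 4 = 0 ∧ t / 4 < k + 1) by rintro ⟨h40, hlt⟩; omega)]
        · -- the new candidate is all 4s (t = 4k): range 0 beats 1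
          have hteq : t = 4 * k := by omega
          have hRs : (PySem.List.max? (List.replicate k.toNat (4:Int) ++ List.replicate ((t - 4*k)/3).toNat 3) fun x => x).getD 0 -
              (PySem.List.min? (List.replicate k.toNat (4:Int) ++ List.replicate ((t - 4*k)/3).toNat 3) fun x => x).getD 0 = (0:Int) := by
            rw [rng_rep_rep _ _ (Or.inl (by omega)),
              if_neg (show ¬ (0 < k.toNat ∧ 0 < ((t - 4*k)/3).toNat) by omega)]
          rw [hRs, if_pos (show (0:Int) < 1 by norm_num),
            if_pos (show t % 4 = 0 ∧ t / 4 < k + 1 from ⟨by omega, by omega⟩),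
            show ((t - 4 * k) / 3).toNat = 0 by omega]
          simp only [List.replicate_zero, List.append_nil]
          congr 2; omega
  · -- no candidate at b = k: state unchanged, and expBest does not change either
    simp only [cgsStep, hmod3]
    rw [if_neg (show ¬ (0 ≤ t - 4 * k ∧ (t - 4 * k) % 3 = 0) by rintro ⟨_, h⟩; exact hcand h)]
    unfold expBest
    by_cases h1 : k ≤ t % 3
    · rw [if_pos h1, if_pos (show k + 1 ≤ t % 3 by omega)]
    · rw [if_neg h1, if_neg (show ¬ (k + 1 ≤ t % 3) by omega)]
      by_cases h30 : t % 3 = 0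
      · rw [if_pos h30, if_pos h30]
      · rw [if_neg h30, if_neg h30]
        by_cases h4 : t % 4 = 0 ∧ t / 4 < k
        · rw [if_pos h4, if_pos (show t % 4 = 0 ∧ t / 4 < k + 1 from ⟨h4.1, by omega⟩)]
        · rw [if_neg h4, if_neg (show ¬ (t % 4 = 0 ∧ t / 4 < k + 1) by
            rintro ⟨ha, hb⟩
            exact h4 ⟨ha, by omega⟩)]

-- the loop invariant, by induction on the number of processed values of b
lemma fold_inv (t : Int) (ht0 : 0 ≤ t) :
    ∀ n : Nat, (n : Int) ≤ t / 4 + 1 →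
      (PySem.List.pyRange 0 (n : Int) 1).foldl (cgsStep t) none = expBest t (n : Int) := by
  intro n
  induction n with
  | zero =>
      intro _
      rw [PySem.List.pyRange_one_eq_nil (by omega)]
      simp only [List.foldl_nil, expBest]
      rw [if_pos (by have := Int.emod_nonneg t (by norm_num : (3:Int) ≠ 0); omega)]
  | succ m ih =>
      intro hm
      have hm' : (m : Int) ≤ t / 4 + 1 := by push_cast at hm ⊢; omega
      have : ((m + 1 : Nat) : Int) = (m : Int) + 1 := by push_cast; ring
      rw [this, PySem.List.pyRange_one_succ_right (by omega), List.foldl_append, ih hm']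
      simp only [List.foldl_cons, List.foldl_nil]
      exact step_inv t m ht0 (by omega) (by push_cast at hm; omega)

theorem compute_game_sizes_spec : Claim_equal_compute_game_sizes := by
  intro n g _ hpre
  obtain ⟨ht0, ht1, ht2, ht5⟩ := hpre
  unfold Spec_compute_game_sizes compute_game_sizes compute_game_sizes_alt
  set t := n * g with htdef
  have hd4 : PySem.Int.floordiv t 4 = t / 4 := PySem.Int.floordiv_eq_ediv_of_pos (by omega)
  have hm3 : PySem.Int.mod t 3 = t % 3 := PySem.Int.mod_eq_emod_of_pos (by omega)
  have hm4 : PySem.Int.mod t 4 = t % 4 := PySem.Int.mod_eq_emod_of_pos (by omega)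
  have hd3 : PySem.Int.floordiv t 3 = t / 3 := PySem.Int.floordiv_eq_ediv_of_pos (by omega)
  have hN : (0:Int) ≤ t / 4 + 1 := by omega
  have hNn : ((t / 4 + 1).toNat : Int) = t / 4 + 1 := by omega
  have hfold := fold_inv t ht0 (t / 4 + 1).toNat (by omega)
  rw [hNn] at hfold
  dsimp only
  rw [hd4, hfold]
  -- finish: evaluate expBest at the end of the loop against B's closed form
  have hb0 : t % 3 ≤ t / 4 := by omega
  unfold expBest
  rw [if_neg (by omega)]
  rw [if_neg (by omega : ¬ (t < 0 ∨ t = 1 ∨ t = 2 ∨ t = 5))]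
  by_cases h30 : t % 3 = 0
  · rw [if_pos h30, hm3, if_pos h30, hd3, PySem.List.pyRepeat_singleton]
    rfl
  · rw [if_neg h30, hm3, if_neg h30, hm4]
    by_cases h40 : t % 4 = 0
    · rw [if_pos ⟨h40, by omega⟩, if_pos h40, PySem.List.pyRepeat_singleton]
      rfl
    · rw [if_neg (by tauto), if_neg h40]
      rw [PySem.Int.floordiv_eq_ediv_of_pos (by norm_num : (0:Int) < 3),
        PySem.List.pyRepeat_singleton, PySem.List.pyRepeat_singleton]
      rfl
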